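-- pv_equiv track=rewrite | github.com/JVH-YYC/Bitumen-ML | DataTools/BitumenCreateUseDataset_edits.py | rectify_condition_dict
-- ===== SOURCE A (Python) =====
-- def rectify_condition_dict(condition_dictionary,
--                            file_processing_lists):
--     """
--     Awful double loop - but only has to be done once - saves a lot of time in the actual creation
--     of the dataset. This is true because the length of condition_dict/file_processing_list are
--     several thousand times smaller than the enumerated list for __getitem()
--
--     Parameters
--     ----------
--     condition_dictionary : TYPE
--         DESCRIPTION.
--     file_processing_list : TYPE
--         DESCRIPTION.
--
--     Returns
--     -------
--     A new condition dictionary that has the actual file processing labels as dictionary keys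
--
--     """
--
--     new_condition_dict = {}
--     for single_processing_list in file_processing_lists:
--         for full_length_entry in single_processing_list:
--             for old_dict_key in condition_dictionary:
--                 if old_dict_key in full_length_entry:
--                     new_condition_dict[full_length_entry] = condition_dictionary[old_dict_key]
--
--     return new_condition_dict
-- ===== SOURCE B (Python) =====
-- def rectify_condition_dict(condition_dictionary,
--                            file_processing_lists):
--     """
--     One pass over the distinct entries: for each entry scan the dictionary
--     keys in reverse and stop at the first hit (= the last matching key in
--     dict order, which is the one whose value A's overwrite loop keeps).
--     """
--     reversed_items = list(condition_dictionary.items())[::-1]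
--     distinct_entries = dict.fromkeys(
--         entry for single_list in file_processing_lists for entry in single_list)
--     new_condition_dict = {}
--     for entry in distinct_entries:
--         match = next((item for item in reversed_items if item[0] in entry), None)
--         if match is not None:
--             new_condition_dict[entry] = match[1]
--     return new_condition_dict
-- ===== Notes on version B (the rewrite author's own statement) =====
-- stated objective: alternative
-- what changed: Instead of A's triple loop that re-scans every key for every (repeated) entry and overwrites the result dict on each match, B dedupes the entries once and, per distinct entry, scans the keys in reverse with early exit, inserting each entry at most once with the value of the last matching key.
import Mathlib
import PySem

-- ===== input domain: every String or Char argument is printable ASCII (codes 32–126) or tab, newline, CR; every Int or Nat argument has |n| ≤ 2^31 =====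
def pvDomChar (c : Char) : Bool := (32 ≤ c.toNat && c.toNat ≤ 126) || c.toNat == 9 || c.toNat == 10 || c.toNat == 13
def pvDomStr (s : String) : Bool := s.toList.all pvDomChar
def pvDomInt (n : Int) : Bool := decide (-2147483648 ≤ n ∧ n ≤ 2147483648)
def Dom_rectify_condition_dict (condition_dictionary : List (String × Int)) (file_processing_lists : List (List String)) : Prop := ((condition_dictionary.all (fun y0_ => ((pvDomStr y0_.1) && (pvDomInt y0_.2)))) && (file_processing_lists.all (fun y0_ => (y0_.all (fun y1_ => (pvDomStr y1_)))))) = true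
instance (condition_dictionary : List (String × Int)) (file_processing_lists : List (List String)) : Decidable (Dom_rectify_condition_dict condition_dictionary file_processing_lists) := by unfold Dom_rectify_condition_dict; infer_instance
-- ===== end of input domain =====

-- B dedupes the entries once and scans the keys in reverse with early exit,
-- replacing A's triple overwrite loop; same return value (alternative decomposition).

-- ===== PORT A =====
def rectify_condition_dict (condition_dictionary : List (String × Int)) (file_processing_lists : List (List String)) : List (String × Int) :=
  (file_processing_lists.foldl
    (fun nd single_processing_list =>
      single_processing_list.foldl
        (fun nd full_length_entry =>
          condition_dictionary.foldl
            (fun nd old_dict_key =>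
              if PySem.Str.isIn old_dict_key.1 full_length_entry then
                nd.insert full_length_entry ((PySem.Dict.mk condition_dictionary).getD old_dict_key.1 0)
              else nd)
            nd)
        nd)
    PySem.Dict.empty).items

-- ===== PORT B =====
-- next((item for item in reversed_items if item[0] in entry), None)
def lastMatch (reversed_items : List (String × Int)) (entry : String) : Option (String × Int) :=
  reversed_items.find? (fun item => PySem.Str.isIn item.1 entry)

def rectify_condition_dict_alt (condition_dictionary : List (String × Int)) (file_processing_lists : List (List String)) : List (String × Int) :=
  let reversed_items := condition_dictionary.reverse
  ((PySem.List.dedup file_processing_lists.flatten).foldl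
    (fun nd entry =>
      match lastMatch reversed_items entry with
      | some item => nd.insert entry item.2
      | none => nd)
    PySem.Dict.empty).items

-- ===== PRECONDITION & SPEC =====
-- Pre_ excludes condition dictionaries whose association list repeats a key: Python's
-- dict collapses duplicates (last value wins, first position kept) and no association-list
-- reading of such an input is canonical, so A's value there is a representation accident.
def Pre_rectify_condition_dict (condition_dictionary : List (String × Int)) (file_processing_lists : List (List String)) : Prop :=
  (condition_dictionary.map Prod.fst).Nodup
instance (condition_dictionary : List (String × Int)) (file_processing_lists : List (List String)) : Decidable (Pre_rectify_condition_dict condition_dictionary file_processing_lists) := by unfold Pre_rectify_condition_dict; infer_instance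

def pvWitness_rectify_condition_dict : (List (String × Int)) × List (List String) :=
  ([("a", 1), ("b", 2)], [["ab", "cd"], ["b"]])

def Spec_rectify_condition_dict (condition_dictionary : List (String × Int)) (file_processing_lists : List (List String)) (out : List (String × Int)) : Prop := out = rectify_condition_dict_alt condition_dictionary file_processing_lists
instance (condition_dictionary : List (String × Int)) (file_processing_lists : List (List String)) (out : List (String × Int)) : Decidable (Spec_rectify_condition_dict condition_dictionary file_processing_lists out) := by unfold Spec_rectify_condition_dict; infer_instance

-- ===== CLAIM (what is proved, stated in full; the proofs are below) =====
def Claim_equal_rectify_condition_dict : Prop := ∀ (condition_dictionary : List (String × Int)) (file_processing_lists : List (List String)), Dom_rectify_condition_dict condition_dictionary file_processing_lists → Pre_rectify_condition_dict condition_dictionary file_processing_lists → Spec_rectify_condition_dict condition_dictionary file_processing_lists (rectify_condition_dict condition_dictionary file_processing_lists)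

-- ===== LEMMAS AND PROOFS =====

-- the per-entry step both programs take, parametrised by the reversed key list
def rcdStep (reversed_items : List (String × Int)) (nd : PySem.Dict String Int) (entry : String) : PySem.Dict String Int :=
  match lastMatch reversed_items entry with
  | some item => nd.insert entry item.2
  | none => nd

lemma insert_self_eq (d : PySem.Dict String Int) (k : String) (v : Int)
    (h : d.get? k = some v) (hn : d.keys.Nodup) : d.insert k v = d := by
  apply PySem.Dict.ext
  rw [PySem.Dict.items_insert_of_contains d v
      (by rw [PySem.Dict.contains_eq_isSome_get?, h]; rfl)]
  have hc : ∀ p ∈ d.items, (if (p.1 == k) = true then (k, v) else p) = (fun p => p) p := by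
    intro p hp
    split_ifs with hk
    · have hk' : p.1 = k := beq_iff_eq.mp hk
      have hget : d.get? p.1 = some p.2 := PySem.Dict.get?_of_mem_items d (by simpa using hp) hn
      rw [hk', h] at hget
      cases p with
      | mk a b => simp at hget ⊢; exact ⟨hk'.symm, hget⟩
    · rfl
  rw [List.map_congr_left hc, List.map_id']

lemma inner_eq (e : String) (f : String → Int) :
    ∀ (l : List (String × Int)) (nd : PySem.Dict String Int),
      (∀ kv ∈ l, f kv.1 = kv.2) →
      l.foldl
        (fun nd kv => if PySem.Str.isIn kv.1 e then nd.insert e (f kv.1) else nd) nd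
        = rcdStep l.reverse nd e := by
  intro l
  induction l with
  | nil => intro nd _; rfl
  | cons kv rest ih =>
    intro nd hl
    simp only [List.foldl_cons]
    rw [ih _ (fun x hx => hl x (List.mem_cons_of_mem _ hx))]
    simp only [rcdStep, lastMatch, List.reverse_cons, List.find?_append]
    cases hfind : rest.reverse.find? (fun item => PySem.Str.isIn item.1 e) with
    | some kv' =>
      simp only [Option.some_or]
      by_cases hin : PySem.Str.isIn kv.1 e
      · simp only [if_pos hin]
        exact PySem.Dict.insert_insert_self nd e (f kv.1) kv'.2
      · simp only [if_neg hin]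
    | none =>
      simp only [Option.none_or, List.find?_singleton]
      by_cases hin : PySem.Str.isIn kv.1 e
      · simp only [if_pos hin]
        rw [hl kv List.mem_cons_self]
      · simp only [if_neg hin]

lemma get?_fold_not_mem (r : List (String × Int)) :
    ∀ (E : List String) (nd : PySem.Dict String Int) (x : String), x ∉ E →
      (E.foldl (rcdStep r) nd).get? x = nd.get? x := by
  intro E
  induction E with
  | nil => intro nd x _; rfl
  | cons e E ih =>
    intro nd x hx
    have hxe : x ≠ e := fun h => hx (h ▸ List.mem_cons_self)
    have hxE : x ∉ E := fun h => hx (List.mem_cons_of_mem _ h)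
    rw [List.foldl_cons, ih _ x hxE]
    unfold rcdStep
    cases lastMatch r e with
    | some item => exact PySem.Dict.get?_insert_of_ne nd item.2 hxe
    | none => rfl

lemma get?_fold_mem (r : List (String × Int)) :
    ∀ (E : List String) (nd : PySem.Dict String Int) (x : String), x ∈ E →
      (E.foldl (rcdStep r) nd).get? x
        = match lastMatch r x with
          | some item => some item.2
          | none => nd.get? x := by
  intro E
  induction E with
  | nil => intro nd x hx; exact absurd hx (List.not_mem_nil)
  | cons e E ih =>
    intro nd x hx
    rw [List.foldl_cons]
    by_cases hxE : x ∈ E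
    · rw [ih _ x hxE]
      cases hlm : lastMatch r x with
      | some item => rfl
      | none =>
        simp only
        by_cases hxe : x = e
        · subst hxe; unfold rcdStep; rw [hlm]
        · unfold rcdStep
          cases lastMatch r e with
          | some item => exact PySem.Dict.get?_insert_of_ne nd item.2 hxe
          | none => rfl
    · have hxe : x = e := by
        rcases List.mem_cons.mp hx with h | h
        · exact h
        · exact absurd h hxE
      subst hxe
      rw [get?_fold_not_mem r E _ x hxE]
      unfold rcdStep
      cases hlm : lastMatch r x with
      | some item => simp [PySem.Dict.get?_insert_self]
      | none => rfl

lemma nodup_fold (r : List (String × Int)) :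
    ∀ (E : List String) (nd : PySem.Dict String Int), nd.keys.Nodup →
      ((E.foldl (rcdStep r) nd).keys).Nodup := by
  intro E
  induction E with
  | nil => intro nd h; exact h
  | cons e E ih =>
    intro nd h
    rw [List.foldl_cons]
    apply ih
    unfold rcdStep
    cases lastMatch r e with
    | some item => exact PySem.Dict.nodup_keys_insert nd e item.2 h
    | none => exact h

lemma dedup_snoc (E : List String) (e : String) :
    PySem.List.dedup (E ++ [e])
      = if e ∈ E then PySem.List.dedup E else PySem.List.dedup E ++ [e] := by
  rw [PySem.List.dedup_eq_ofList, PySem.List.dedup_eq_ofList]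
  have h1 : PySem.Set.ofList (E ++ [e]) = PySem.Set.add (PySem.Set.ofList E) e := by
    simp [PySem.Set.ofList]
  rw [h1]
  by_cases h : e ∈ E
  · have : e ∈ PySem.Set.ofList E := (PySem.Set.mem_ofList E e).mpr h
    simp [PySem.Set.add, this, h]
  · have : e ∉ PySem.Set.ofList E := fun hc => h ((PySem.Set.mem_ofList E e).mp hc)
    simp [PySem.Set.add, this, h]

lemma fold_dedup (r : List (String × Int)) (E : List String) :
    E.foldl (rcdStep r) PySem.Dict.empty
      = (PySem.List.dedup E).foldl (rcdStep r) PySem.Dict.empty := by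
  induction E using List.reverseRecOn with
  | nil => rfl
  | append_singleton E e ih =>
    rw [List.foldl_append, dedup_snoc]
    by_cases h : e ∈ E
    · simp only [h, if_true]
      rw [← ih]
      simp only [List.foldl_cons, List.foldl_nil]
      cases hlm : lastMatch r e with
      | some item =>
        have hs : rcdStep r (E.foldl (rcdStep r) PySem.Dict.empty) e
            = (E.foldl (rcdStep r) PySem.Dict.empty).insert e item.2 := by
          unfold rcdStep; rw [hlm]
        rw [hs]
        apply insert_self_eq
        · rw [get?_fold_mem r E _ e h, hlm]
        · exact nodup_fold r E _ PySem.Dict.nodup_keys_empty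
      | none =>
        have hs : rcdStep r (E.foldl (rcdStep r) PySem.Dict.empty) e
            = E.foldl (rcdStep r) PySem.Dict.empty := by
          unfold rcdStep; rw [hlm]
        rw [hs]
    · simp only [h, if_false]
      rw [List.foldl_append, ih]

-- ===== VERDICT (by name: the statement is the Claim_ definition above) =====
theorem rectify_condition_dict_spec : Claim_equal_rectify_condition_dict := by
  intro cd fpl _hdom hpre
  unfold Spec_rectify_condition_dict rectify_condition_dict rectify_condition_dict_alt
  have hl : ∀ kv ∈ cd, (PySem.Dict.mk cd).getD kv.1 0 = kv.2 := by
    intro kv hkv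
    exact PySem.Dict.getD_of_mem_items (PySem.Dict.mk cd) (by exact hkv) (by simpa [PySem.Dict.keys] using hpre) 0
  have hstep :
      (fun (nd : PySem.Dict String Int) (full_length_entry : String) =>
        cd.foldl
          (fun nd old_dict_key =>
            if PySem.Str.isIn old_dict_key.1 full_length_entry then
              nd.insert full_length_entry ((PySem.Dict.mk cd).getD old_dict_key.1 0)
            else nd)
          nd)
        = rcdStep cd.reverse := by
    funext nd e
    exact inner_eq e (fun k => (PySem.Dict.mk cd).getD k 0) cd nd hl
  rw [← List.foldl_flatten, hstep, fold_dedup]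
  rfl
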